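-- pv_equiv track=rewrite | github.com/rabuf/advent-of-code | python/aoc2025/day02.py | invalid
-- ===== SOURCE A (Python) =====
-- def invalid(r: range):
--     result = 0
--     for i in r:
--         s = str(i)
--         if len(s) % 2 == 0:
--             if s[0 : len(s) // 2] == s[len(s) // 2 :]:
--                 result += i
--     return result
-- ===== SOURCE B (Python) =====
-- def invalid(r):
--     # per-element arithmetic test: a positive i with an even digit count 2k has
--     # equal string halves iff (10**k + 1) divides i; no string is ever built.
--     total = 0
--     for i in r:
--         if i > 0:
--             k = 1
--             p = 10
--             while p <= i:
--                 k += 1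
--                 p *= 10
--             if k % 2 == 0:
--                 if i % (10 ** (k // 2) + 1) == 0:
--                     total += i
--     return total
-- ===== Notes on version B (the rewrite author's own statement) =====
-- stated objective: alternative
-- what changed: Replaces per-element string construction and half-slice comparison with a pure arithmetic test: count digits by repeated comparison with powers of 10, then check divisibility by 10^(digits/2)+1.
import Mathlib
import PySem

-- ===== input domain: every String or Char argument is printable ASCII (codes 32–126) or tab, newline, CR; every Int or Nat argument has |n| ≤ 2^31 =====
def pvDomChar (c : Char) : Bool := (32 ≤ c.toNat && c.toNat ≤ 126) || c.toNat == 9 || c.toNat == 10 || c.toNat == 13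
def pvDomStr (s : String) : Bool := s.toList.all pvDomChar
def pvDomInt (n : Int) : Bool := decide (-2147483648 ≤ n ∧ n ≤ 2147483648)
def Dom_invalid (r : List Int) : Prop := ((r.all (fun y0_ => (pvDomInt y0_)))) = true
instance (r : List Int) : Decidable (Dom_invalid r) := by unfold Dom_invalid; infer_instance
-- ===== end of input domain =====

-- B replaces A's per-element string build and half-slice comparison by a pure arithmetic
-- test (digit count via powers of 10, then divisibility by 10^(digits/2)+1); same results.

-- ===== PORT A =====
def invalid (r : List Int) : Int :=
  r.foldl (fun result i =>
    let s := PySem.Int.toChars i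
    let len : Int := PySem.List.len s
    if PySem.Int.mod len 2 = 0 then
      if PySem.List.slice s (some 0) (some (PySem.Int.floordiv len 2)) =
         PySem.List.slice s (some (PySem.Int.floordiv len 2)) none then
        result + i
      else result
    else result) 0

-- ===== PORT B =====
-- the `while p <= i: k += 1; p *= 10` loop of Source B (p kept as a Nat, positive, so it terminates)
def invalidDigitLoop (i : Int) (k p : Nat) (hp : 0 < p) : Nat :=
  if (p : Int) ≤ i then invalidDigitLoop i (k + 1) (p * 10) (by omega) else k
  termination_by i.toNat + 1 - p
  decreasing_by omega

def invalid_alt (r : List Int) : Int :=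
  r.foldl (fun total i =>
    if 0 < i then
      let k := invalidDigitLoop i 1 10 (by norm_num)
      if k % 2 = 0 then
        if PySem.Int.mod i ((10 : Int) ^ (k / 2) + 1) = 0 then total + i else total
      else total
    else total) 0

-- ===== PRECONDITION & SPEC =====
def Spec_invalid (r : List Int) (out : Int) : Prop := out = invalid_alt r
instance (r : List Int) (out : Int) : Decidable (Spec_invalid r out) := by unfold Spec_invalid; infer_instance

-- ===== CLAIM (what is proved, stated in full; the proofs are below) =====
def Claim_equal_invalid : Prop := ∀ (r : List Int), Dom_invalid r → Spec_invalid r (invalid r)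

-- ===== LEMMAS AND PROOFS =====

-- Nat.toDigitsCore with the accumulator is the accumulator-free run appended
lemma toDigitsCore_acc (f : Nat) : ∀ (n : Nat) (acc : List Char),
    Nat.toDigitsCore 10 f n acc = Nat.toDigitsCore 10 f n [] ++ acc := by
  induction f with
  | zero => intro n acc; simp [Nat.toDigitsCore]
  | succ f ih =>
    intro n acc
    simp only [Nat.toDigitsCore]
    by_cases h : n / 10 = 0
    · simp [h]
    · simp only [h, if_false]
      rw [ih (n / 10) (Nat.digitChar (n % 10) :: acc), ih (n / 10) [Nat.digitChar (n % 10)]]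
      simp

-- for 0 < n and enough fuel, toDigitsCore produces the decimal digits (big-endian)
lemma toDigitsCore_eq_digits (f : Nat) : ∀ (n : Nat), 0 < n → n ≤ f →
    Nat.toDigitsCore 10 f n [] = ((Nat.digits 10 n).map Nat.digitChar).reverse := by
  induction f with
  | zero => intro n hn hf; omega
  | succ f ih =>
    intro n hn hf
    simp only [Nat.toDigitsCore]
    by_cases h : n / 10 = 0
    · have hlt : n < 10 := by omega
      rw [Nat.digits_of_lt 10 n (by omega) hlt]
      simp [Nat.mod_eq_of_lt hlt]
      exact fun h10 => absurd h10 (by omega)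
    · simp only [h, if_false]
      rw [toDigitsCore_acc, ih (n / 10) (by omega) (by omega)]
      rw [Nat.digits_def' (by norm_num : (1:Nat) < 10) hn]
      simp

lemma toChars_of_pos (n : Nat) (hn : 0 < n) :
    PySem.Int.toChars (n : Int) = ((Nat.digits 10 n).map Nat.digitChar).reverse := by
  simp only [PySem.Int.toChars]
  rw [if_neg (by omega)]
  simp only [Int.toNat_natCast]
  exact toDigitsCore_eq_digits (n + 1) n hn (by omega)

lemma digitChar_inj {d e : Nat} (hd : d < 10) (he : e < 10) (h : Nat.digitChar d = Nat.digitChar e) : d = e := by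
  interval_cases d <;> interval_cases e <;> simp_all [Nat.digitChar]

lemma digitChar_ne_minus {d : Nat} (hd : d < 10) : Nat.digitChar d ≠ '-' := by
  interval_cases d <;> simp [Nat.digitChar]

lemma map_digitChar_inj : ∀ (l1 l2 : List Nat), (∀ d ∈ l1, d < 10) → (∀ d ∈ l2, d < 10) →
    l1.map Nat.digitChar = l2.map Nat.digitChar → l1 = l2 := by
  intro l1
  induction l1 with
  | nil => intro l2 _ _ h; cases l2 <;> simp_all
  | cons a t ih =>
    intro l2 h1 h2 h
    cases l2 with
    | nil => simp_all
    | cons b u =>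
      simp only [List.map_cons, List.cons.injEq] at h
      have := digitChar_inj (h1 a (by simp)) (h2 b (by simp)) h.1
      have := ih u (fun d hd => h1 d (by simp [hd])) (fun d hd => h2 d (by simp [hd])) h.2
      simp_all

lemma ofDigits_inj : ∀ (l1 l2 : List Nat), (∀ d ∈ l1, d < 10) → (∀ d ∈ l2, d < 10) →
    l1.length = l2.length → Nat.ofDigits 10 l1 = Nat.ofDigits 10 l2 → l1 = l2 := by
  intro l1
  induction l1 with
  | nil => intro l2 _ _ hl _; cases l2 <;> simp_all
  | cons a t ih =>
    intro l2 h1 h2 hl hv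
    cases l2 with
    | nil => simp_all
    | cons b u =>
      simp only [Nat.ofDigits_cons] at hv
      have ha : a < 10 := h1 a (by simp)
      have hb : b < 10 := h2 b (by simp)
      have hab : a = b := by omega
      have htu : Nat.ofDigits 10 t = Nat.ofDigits 10 u := by omega
      have := ih u (fun d hd => h1 d (by simp [hd])) (fun d hd => h2 d (by simp [hd]))
        (by simpa using hl) htu
      simp_all

-- the digit-counting loop: starting from k with p = 10^k and 10^(k-1) ≤ i,
-- it returns K with 10^(K-1) ≤ i < 10^K (and 1 ≤ K)
lemma invalidDigitLoop_sandwich_aux (m : Nat) : ∀ (i : Int) (k p : Nat) (hp : 0 < p),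
    m = i.toNat + 1 - p → p = 10 ^ k → 1 ≤ k → (10 : Int) ^ (k - 1) ≤ i →
    1 ≤ invalidDigitLoop i k p hp ∧
    (10 : Int) ^ (invalidDigitLoop i k p hp - 1) ≤ i ∧
    i < (10 : Int) ^ invalidDigitLoop i k p hp := by
  induction m using Nat.strong_induction_on with
  | _ m ih =>
    intro i k p hp hm hpk hk hlo
    rw [invalidDigitLoop]
    by_cases h : (p : Int) ≤ i
    · rw [if_pos h]
      have hple : p ≤ i.toNat := by omega
      refine ih (i.toNat + 1 - p * 10) (by omega) i (k + 1) (p * 10) (by omega) rfl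
        (by rw [hpk]; ring) (by omega) ?_
      simpa [hpk] using h
    · rw [if_neg h]
      refine ⟨hk, hlo, ?_⟩
      have : (((10 : Nat) ^ k : Nat) : Int) = (10 : Int) ^ k := by push_cast; ring
      omega

lemma invalidDigitLoop_sandwich (i : Int) (hi : 1 ≤ i) (hp : 0 < 10) :
    1 ≤ invalidDigitLoop i 1 10 hp ∧
    (10 : Int) ^ (invalidDigitLoop i 1 10 hp - 1) ≤ i ∧
    i < (10 : Int) ^ invalidDigitLoop i 1 10 hp :=
  invalidDigitLoop_sandwich_aux (i.toNat + 1 - 10) i 1 10 hp rfl (by norm_num) le_rfl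
    (by simpa using hi)

lemma digits_length_eq_of_sandwich (n K : Nat) (hK : 1 ≤ K)
    (hlo : 10 ^ (K - 1) ≤ n) (hhi : n < 10 ^ K) : (Nat.digits 10 n).length = K := by
  have h1 : (Nat.digits 10 n).length ≤ K := (Nat.digits_length_le_iff (by norm_num) n).mpr hhi
  have h2 : K - 1 < (Nat.digits 10 n).length := (Nat.lt_digits_length_iff (by norm_num) n).mpr hlo
  omega

-- fixed arithmetic core: with n = a + 10^j * b and a, b < 10^j, a = b ↔ (10^j + 1) ∣ n
lemma halves_arith (j n a b : Nat) (hval : n = a + 10 ^ j * b) (ha : a < 10 ^ j) (hb : b < 10 ^ j) :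
    a = b ↔ (10 ^ j + 1) ∣ n := by
  constructor
  · rintro rfl
    exact ⟨a, by rw [hval]; ring⟩
  · intro h
    have h1 : ((10 ^ j + 1 : Nat) : Int) ∣ ((a : Int) - (b : Int)) := by
      have hn : ((10 ^ j + 1 : Nat) : Int) ∣ (n : Int) := Int.natCast_dvd_natCast.mpr h
      have h2 : ((a : Int) - (b : Int)) = (n : Int) - (b : Int) * ((10 ^ j + 1 : Nat) : Int) := by
        push_cast [hval]; ring
      rw [h2]
      exact Int.dvd_sub hn (Dvd.intro_left _ rfl)
    have h0 : (a : Int) - b = 0 := by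
      refine Int.eq_zero_of_abs_lt_dvd h1 ?_
      rw [abs_lt]
      have haI : (a : Int) < ((10 ^ j : Nat) : Int) := by exact_mod_cast ha
      have hbI : (b : Int) < ((10 ^ j : Nat) : Int) := by exact_mod_cast hb
      have hc : ((10 ^ j + 1 : Nat) : Int) = ((10 ^ j : Nat) : Int) + 1 := by push_cast; ring
      omega
    omega

-- halves of the decimal string equal ↔ divisibility by 10^j + 1
lemma halves_iff_dvd (n j : Nat) (_hn : 0 < n) (hL : (Nat.digits 10 n).length = 2 * j) :
    (((Nat.digits 10 n).map Nat.digitChar).reverse.take j =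
     ((Nat.digits 10 n).map Nat.digitChar).reverse.drop j) ↔ (10 ^ j + 1) ∣ n := by
  have hdig : ∀ d ∈ Nat.digits 10 n, d < 10 := fun d hd => Nat.digits_lt_base' hd
  have hlen_take : ((Nat.digits 10 n).take j).length = j := by
    rw [List.length_take]; omega
  have hlen_drop : ((Nat.digits 10 n).drop j).length = j := by
    rw [List.length_drop]; omega
  have hXr : (Nat.digits 10 n).reverse =
      ((Nat.digits 10 n).drop j).reverse ++ ((Nat.digits 10 n).take j).reverse := by
    conv_lhs => rw [← List.take_append_drop j (Nat.digits 10 n)]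
    rw [List.reverse_append]
  have hmapsplit : ((Nat.digits 10 n).map Nat.digitChar).reverse =
      ((Nat.digits 10 n).drop j).reverse.map Nat.digitChar ++
      ((Nat.digits 10 n).take j).reverse.map Nat.digitChar := by
    rw [← List.map_reverse, hXr, List.map_append]
  have htake : (((Nat.digits 10 n).map Nat.digitChar).reverse).take j =
      (((Nat.digits 10 n).drop j).reverse).map Nat.digitChar := by
    rw [hmapsplit]
    exact List.take_left' (by simpa using hlen_drop)
  have hdrop : (((Nat.digits 10 n).map Nat.digitChar).reverse).drop j =
      (((Nat.digits 10 n).take j).reverse).map Nat.digitChar := by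
    rw [hmapsplit]
    exact List.drop_left' (by simpa using hlen_drop)
  rw [htake, hdrop]
  have hval : n = Nat.ofDigits 10 ((Nat.digits 10 n).take j) +
      10 ^ j * Nat.ofDigits 10 ((Nat.digits 10 n).drop j) := by
    conv_lhs => rw [← Nat.ofDigits_digits 10 n, ← List.take_append_drop j (Nat.digits 10 n)]
    rw [Nat.ofDigits_append, hlen_take]
  have ha : Nat.ofDigits 10 ((Nat.digits 10 n).take j) < 10 ^ j := by
    have := Nat.ofDigits_lt_base_pow_length (b := 10) (l := (Nat.digits 10 n).take j)
      (by norm_num) (fun d hd => hdig d (List.mem_of_mem_take hd))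
    rwa [hlen_take] at this
  have hb : Nat.ofDigits 10 ((Nat.digits 10 n).drop j) < 10 ^ j := by
    have := Nat.ofDigits_lt_base_pow_length (b := 10) (l := (Nat.digits 10 n).drop j)
      (by norm_num) (fun d hd => hdig d (List.mem_of_mem_drop hd))
    rwa [hlen_drop] at this
  have harith := halves_arith j n _ _ hval ha hb
  constructor
  · intro h
    have hdt : (Nat.digits 10 n).drop j = (Nat.digits 10 n).take j :=
      List.reverse_inj.mp (map_digitChar_inj _ _
        (fun d hd => hdig d (List.mem_of_mem_drop (List.mem_reverse.mp hd)))
        (fun d hd => hdig d (List.mem_of_mem_take (List.mem_reverse.mp hd))) h)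
    exact harith.mp (congrArg (Nat.ofDigits 10) hdt.symm)
  · intro h
    have heq := harith.mpr h
    have hdt : (Nat.digits 10 n).take j = (Nat.digits 10 n).drop j :=
      ofDigits_inj _ _ (fun d hd => hdig d (List.mem_of_mem_take hd))
        (fun d hd => hdig d (List.mem_of_mem_drop hd)) (by omega) heq
    rw [hdt]

-- A's condition on a positive i, in digit form
lemma A_cond_pos (i : Int) (hi : 0 < i) (K : Nat) (hK : (Nat.digits 10 i.toNat).length = K) :
    PySem.Int.toChars i = ((Nat.digits 10 i.toNat).map Nat.digitChar).reverse ∧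
    PySem.List.len (PySem.Int.toChars i) = (K : Int) := by
  have hs : PySem.Int.toChars i = ((Nat.digits 10 i.toNat).map Nat.digitChar).reverse := by
    have hin : i = (i.toNat : Int) := (Int.toNat_of_nonneg (by omega)).symm
    rw [hin]
    exact toChars_of_pos i.toNat (by omega)
  refine ⟨hs, ?_⟩
  rw [hs, PySem.List.len_eq]
  simp [hK]

-- the two per-element step functions agree
lemma step_eq : (fun (result i : Int) =>
    let s := PySem.Int.toChars i
    let len : Int := PySem.List.len s
    if PySem.Int.mod len 2 = 0 then
      if PySem.List.slice s (some 0) (some (PySem.Int.floordiv len 2)) =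
         PySem.List.slice s (some (PySem.Int.floordiv len 2)) none then
        result + i
      else result
    else result) = (fun (total i : Int) =>
    if 0 < i then
      let k := invalidDigitLoop i 1 10 (by norm_num)
      if k % 2 = 0 then
        if PySem.Int.mod i ((10 : Int) ^ (k / 2) + 1) = 0 then total + i else total
      else total
    else total) := by
  funext result i
  dsimp only
  by_cases hi : 0 < i
  · rw [if_pos hi]
    obtain ⟨hK1, hKlo, hKhi⟩ := invalidDigitLoop_sandwich i (by omega) (by norm_num)
    set K := invalidDigitLoop i 1 10 (by norm_num : (0:Nat) < 10) with hKdef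
    set n := i.toNat with hndef
    have hin : i = (n : Int) := (Int.toNat_of_nonneg (by omega)).symm
    have hn : 0 < n := by omega
    have hcastpow : ∀ e : Nat, ((10 ^ e : Nat) : Int) = (10 : Int) ^ e := by
      intro e; push_cast; ring
    have hlenK : (Nat.digits 10 n).length = K := by
      refine digits_length_eq_of_sandwich n K hK1 ?_ ?_
      · have := hKlo; rw [hin] at this
        exact_mod_cast (hcastpow (K - 1)) ▸ this
      · have := hKhi; rw [hin] at this
        exact_mod_cast (hcastpow K) ▸ this
    obtain ⟨hs, hlen⟩ := A_cond_pos i hi K hlenK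
    rw [hlen]
    have hmod : PySem.Int.mod (K : Int) 2 = ((K % 2 : Nat) : Int) := by
      exact_mod_cast PySem.Int.mod_natCast K 2
    have hdiv : PySem.Int.floordiv (K : Int) 2 = ((K / 2 : Nat) : Int) := by
      exact_mod_cast PySem.Int.floordiv_natCast K 2
    rw [hmod, hdiv]
    by_cases hK2 : K % 2 = 0
    · rw [if_pos (by exact_mod_cast hK2), if_pos hK2]
      have hslice1 : PySem.List.slice (PySem.Int.toChars i) (some 0) (some ((K / 2 : Nat) : Int)) =
          (PySem.Int.toChars i).take (K / 2) := by
        rw [PySem.List.slice_zero_start]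
        exact PySem.List.slice_to_natCast _ _
      have hslice2 : PySem.List.slice (PySem.Int.toChars i) (some ((K / 2 : Nat) : Int)) none =
          (PySem.Int.toChars i).drop (K / 2) := PySem.List.slice_from_natCast _ _
      rw [hslice1, hslice2, hs]
      have hiff := halves_iff_dvd n (K / 2) hn (by omega)
      have hiffB : (PySem.Int.mod i ((10 : Int) ^ (K / 2) + 1) = 0) ↔ (10 ^ (K / 2) + 1) ∣ n := by
        rw [PySem.Int.mod_eq_zero_iff_dvd, hin]
        rw [show ((10 : Int) ^ (K / 2) + 1) = ((10 ^ (K / 2) + 1 : Nat) : Int) by push_cast; ring]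
        exact Int.natCast_dvd_natCast
      exact if_congr (hiff.trans hiffB.symm) rfl rfl
    · rw [if_neg (by exact_mod_cast hK2), if_neg hK2]
  · rw [if_neg hi]
    rcases (by omega : i = 0 ∨ i < 0) with h0 | hneg
    · subst h0
      rw [if_neg (by decide)]
    · set m := i.natAbs with hmdef
      have hm : 0 < m := by omega
      have hchars : PySem.Int.toChars i = '-' :: ((Nat.digits 10 m).map Nat.digitChar).reverse := by
        simp only [PySem.Int.toChars, if_pos hneg]
        congr 1
        exact toDigitsCore_eq_digits (m + 1) m hm (by omega)
      set L := (Nat.digits 10 m).length with hLdef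
      have hLpos : 0 < L := by
        rw [hLdef]
        have : Nat.digits 10 m ≠ [] := Nat.digits_ne_nil_iff_ne_zero.mpr hm.ne'
        exact List.length_pos_iff.mpr this
      have hlen : PySem.List.len (PySem.Int.toChars i) = ((L + 1 : Nat) : Int) := by
        rw [hchars, PySem.List.len_eq]
        simp [hLdef]
      rw [hlen]
      have hmod : PySem.Int.mod ((L + 1 : Nat) : Int) 2 = (((L + 1) % 2 : Nat) : Int) := by
        exact_mod_cast PySem.Int.mod_natCast (L + 1) 2
      rw [hmod]
      by_cases hpar : (L + 1) % 2 = 0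
      · rw [if_pos (by exact_mod_cast hpar)]
        have hdiv : PySem.Int.floordiv ((L + 1 : Nat) : Int) 2 = (((L + 1) / 2 : Nat) : Int) := by
          exact_mod_cast PySem.Int.floordiv_natCast (L + 1) 2
        rw [hdiv]
        set j := (L + 1) / 2 with hjdef
        have hj1 : 1 ≤ j := by omega
        have hjL : j ≤ L := by omega
        have hslice1 : PySem.List.slice (PySem.Int.toChars i) (some 0) (some (j : Int)) =
            (PySem.Int.toChars i).take j := by
          rw [PySem.List.slice_zero_start]
          exact PySem.List.slice_to_natCast _ _
        have hslice2 : PySem.List.slice (PySem.Int.toChars i) (some (j : Int)) none =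
            (PySem.Int.toChars i).drop j := PySem.List.slice_from_natCast _ _
        rw [hslice1, hslice2]
        rw [if_neg ?_]
        intro heq
        have hslen : (PySem.Int.toChars i).length = L + 1 := by
          rw [hchars]; simp [hLdef]
        have h0 : ((PySem.Int.toChars i).take j)[0]? = ((PySem.Int.toChars i).drop j)[0]? := by
          rw [heq]
        rw [List.getElem?_take_of_lt (by omega), List.getElem?_drop] at h0
        have hfirst : (PySem.Int.toChars i)[0]? = some '-' := by
          rw [hchars]; rfl
        obtain ⟨j', hj'⟩ : ∃ j', j = j' + 1 := ⟨j - 1, by omega⟩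
        have hjth : (PySem.Int.toChars i)[j + 0]? =
            (((Nat.digits 10 m).map Nat.digitChar).reverse)[j']? := by
          rw [hchars, hj']
          simp
        rw [hfirst, hjth] at h0
        have hj'lt : j' < (((Nat.digits 10 m).map Nat.digitChar).reverse).length := by
          simp; omega
        rw [List.getElem?_eq_getElem hj'lt] at h0
        have hmem : (((Nat.digits 10 m).map Nat.digitChar).reverse)[j'] ∈
            ((Nat.digits 10 m).map Nat.digitChar).reverse := List.getElem_mem hj'lt
        rw [List.mem_reverse, List.mem_map] at hmem
        obtain ⟨d, hd, hdc⟩ := hmem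
        have : Nat.digitChar d = '-' := by
          rw [hdc]
          exact (Option.some.inj h0).symm
        exact digitChar_ne_minus (Nat.digits_lt_base' hd) this
      · rw [if_neg (by exact_mod_cast hpar)]

-- ===== VERDICT (by name: the statement is the Claim_ definition above) =====
theorem invalid_spec : Claim_equal_invalid := by
  intro r _
  unfold Spec_invalid invalid invalid_alt
  rw [step_eq]
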